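-- pv_equiv track=rewrite | github.com/CraftyPythonDeveloper/product-scrapers | experiments/sgs_scraper_v2.py | product_link_generator
-- ===== SOURCE A (Python) =====
-- def product_link_generator(end: int = 100) -> list:
--     """
--     Function to generate the product link by following the url pattern.
--
--     :param end: No of products. default is 100
--     :return: list
--     """
--     base_url = "https://campaigns.sgs.com/en/vr/product-recalls-light/record?p={pg_no}" \
--                "&d=0&id=18CD45C15541&dc=http&lb=&rec={rec_no}"
--
--     links = []
--     for i in range(0, end, 10):
--         for rec in range(10):
--             links.append(base_url.format(pg_no=i, rec_no=rec))
--     return links[:end]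
-- ===== SOURCE B (Python) =====
-- def product_link_generator(end: int = 100) -> list:
--     """
--     Function to generate the product link by following the url pattern.
--
--     :param end: No of products. default is 100
--     :return: list
--     """
--     base_url = "https://campaigns.sgs.com/en/vr/product-recalls-light/record?p={pg_no}" \
--                "&d=0&id=18CD45C15541&dc=http&lb=&rec={rec_no}"
--     return [base_url.format(pg_no=(j // 10) * 10, rec_no=j % 10) for j in range(end)]
-- ===== Notes on version B (the rewrite author's own statement) =====
-- stated objective: simpler
-- what changed: Replaced the nested page/record double loop plus trailing [:end] slice with a single comprehension over range(end) that computes pg_no=(j//10)*10 and rec_no=j%10 in closed form, so exactly end links are built and no slice is needed.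
import Mathlib
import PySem

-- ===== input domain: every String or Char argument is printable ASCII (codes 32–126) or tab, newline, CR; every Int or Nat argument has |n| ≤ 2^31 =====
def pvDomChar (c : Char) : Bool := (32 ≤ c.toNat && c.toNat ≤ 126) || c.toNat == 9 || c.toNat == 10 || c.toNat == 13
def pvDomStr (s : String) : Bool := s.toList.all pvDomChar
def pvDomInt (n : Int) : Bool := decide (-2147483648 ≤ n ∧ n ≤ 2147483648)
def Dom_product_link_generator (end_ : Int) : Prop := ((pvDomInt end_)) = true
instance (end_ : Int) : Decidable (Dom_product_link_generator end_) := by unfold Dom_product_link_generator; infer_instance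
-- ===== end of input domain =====

-- B replaces A's nested page/record loops plus trailing slice by one flat pass with
-- closed-form index arithmetic (pg_no = (j//10)*10, rec_no = j%10): simpler decomposition.


-- ===== PORT A =====
-- base_url.format(pg_no=…, rec_no=…): the template with the two fields substituted by str(n).
def fmtLink (pg rec : Int) : String :=
  PySem.Str.join ""
    ["https://campaigns.sgs.com/en/vr/product-recalls-light/record?p=",
     PySem.Int.toStr pg,
     "&d=0&id=18CD45C15541&dc=http&lb=&rec=",
     PySem.Int.toStr rec]

def product_link_generator (end_ : Int) : List String :=
  let links : List String :=
    (PySem.List.pyRange 0 end_ 10).foldl (fun links i =>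
      (PySem.List.pyRange 0 10 1).foldl (fun links rec => links ++ [fmtLink i rec]) links) []
  PySem.List.slice links none (some end_)

-- ===== PORT B =====
def product_link_generator_alt (end_ : Int) : List String :=
  (PySem.List.pyRange 0 end_ 1).map (fun j =>
    fmtLink (PySem.Int.floordiv j 10 * 10) (PySem.Int.mod j 10))

-- ===== PRECONDITION & SPEC =====
def Spec_product_link_generator (end_ : Int) (out : List String) : Prop := out = product_link_generator_alt end_
instance (end_ : Int) (out : List String) : Decidable (Spec_product_link_generator end_ out) := by unfold Spec_product_link_generator; infer_instance

-- ===== CLAIM (what is proved, stated in full; the proofs are below) =====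
def Claim_equal_product_link_generator : Prop := ∀ (end_ : Int), Dom_product_link_generator end_ → Spec_product_link_generator end_ (product_link_generator end_)

-- ===== LEMMAS AND PROOFS =====

-- the flat-index view of one page of A's output
def pvH (j : Nat) : String := fmtLink ((j / 10 : Nat) * 10) ((j % 10 : Nat))

lemma pvH_eq (m r : Nat) (h : r < 10) : pvH (10 * m + r) = fmtLink (10 * (m : Int)) (r : Int) := by
  unfold pvH
  have h1 : (10 * m + r) / 10 = m := by omega
  have h2 : (10 * m + r) % 10 = r := by omega
  rw [h1, h2]
  congr 1
  ring

lemma pvChunk (m : Nat) (acc : List String) :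
    (PySem.List.pyRange 0 10 1).foldl (fun links rec => links ++ [fmtLink (0 + 10 * (m : Int)) rec]) acc
      = acc ++ (List.range 10).map (fun r => pvH (10 * m + r)) := by
  have h : PySem.List.pyRange 0 10 1 = [0,1,2,3,4,5,6,7,8,9] := by decide
  have hr : List.range 10 = [0,1,2,3,4,5,6,7,8,9] := by decide
  rw [h, hr]
  simp [List.foldl, pvH_eq]
  have h0 := pvH_eq m 0 (by norm_num)
  simp at h0
  exact h0.symm

lemma pvFlat (m : Nat) :
    List.foldl (fun (links : List String) (k : Nat) =>
        (PySem.List.pyRange 0 10 1).foldl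
          (fun links rec => links ++ [fmtLink (0 + 10 * (k : Int)) rec]) links)
      [] (List.range m)
      = (List.range (10 * m)).map pvH := by
  induction m with
  | zero => rfl
  | succ m ih =>
    rw [List.range_succ, List.foldl_append, ih]
    rw [show 10 * (m + 1) = 10 * m + 10 by ring, List.range_add, List.map_append]
    simp only [List.foldl_cons, List.foldl_nil]
    rw [pvChunk, List.map_map]
    simp [Function.comp]

lemma pvB_eq (k : Nat) :
    fmtLink (PySem.Int.floordiv (k : Int) 10 * 10) (PySem.Int.mod (k : Int) 10) = pvH k := by
  have h1 : PySem.Int.floordiv (k : Int) 10 = ((k / 10 : Nat) : Int) := by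
    exact_mod_cast PySem.Int.floordiv_natCast k 10
  have h2 : PySem.Int.mod (k : Int) 10 = ((k % 10 : Nat) : Int) := by
    exact_mod_cast PySem.Int.mod_natCast k 10
  unfold pvH
  rw [h1, h2]

lemma pvMain (n : Nat) : product_link_generator (n : Int) = product_link_generator_alt (n : Int) := by
  unfold product_link_generator product_link_generator_alt
  rw [PySem.List.pyRange_of_pos 0 (n : Int) (by norm_num : (0:Int) < 10), List.foldl_map]
  set M : Nat := if (0:Int) < (n : Int) then (((n : Int) - 0 + 10 - 1) / 10).toNat else 0 with hMdef
  have hnM : n ≤ 10 * M := by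
    by_cases hpos : (0:Int) < (n : Int)
    · simp only [hMdef, if_pos hpos]
      omega
    · have h0 : n = 0 := by omega
      omega
  rw [pvFlat M]
  rw [PySem.List.slice_to _ (Int.natCast_nonneg n)]
  rw [PySem.List.pyRange_one]
  simp only [sub_zero, Int.toNat_natCast, zero_add]
  rw [← List.map_take, List.take_range, Nat.min_eq_left hnM, List.map_map]
  apply List.map_congr_left
  intro k _
  exact (pvB_eq k).symm

-- ===== VERDICT (by name: the statement is the Claim_ definition above) =====
theorem product_link_generator_spec : Claim_equal_product_link_generator := by
  intro e _
  unfold Spec_product_link_generator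
  by_cases h : 0 ≤ e
  · have := pvMain e.toNat
    rwa [Int.toNat_of_nonneg h] at this
  · -- both empty for negative end
    unfold product_link_generator product_link_generator_alt
    rw [PySem.List.pyRange_of_pos 0 e (by norm_num : (0:Int) < 10), PySem.List.pyRange_one]
    simp [if_neg (by omega : ¬ (0:Int) < e), PySem.List.slice]
    exact PySem.List.pyRange_one_eq_nil (by omega)
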